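-- pv_equiv track=rewrite | github.com/mldeod/hierarchy-validator | modules/hierarchy_validator/fixable_issues_visualizer.py | highlight_whitespace_issues
-- ===== SOURCE A (Python) =====
-- def highlight_whitespace_issues(text):
--     """
--     Highlight ONLY problem whitespace (leading/trailing/tabs/double)
--     Returns: html_with_highlights showing the problem
--
--     PRESERVED FROM V1 - This logic is brilliant!
--     """
--     result = []
--
--     # Check for leading spaces
--     leading_count = 0
--     if text and text[0] == ' ':
--         leading_count = len(text) - len(text.lstrip(' '))
--         for i in range(leading_count):
--             result.append('<span style="background-color: #ffebee; padding: 2px 4px; margin: 0 1px; border-radius: 2px;">·</span>')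
--         text = text[leading_count:]
--
--     # Check for trailing spaces (process from end)
--     trailing_count = 0
--     if text and text[-1] == ' ':
--         trailing_count = len(text) - len(text.rstrip(' '))
--         text = text[:-trailing_count]
--
--     # Process middle (tabs and double spaces)
--     i = 0
--     while i < len(text):
--         char = text[i]
--
--         # Tab
--         if char == '\t':
--             result.append('<span style="background-color: #ffebee; padding: 2px 6px; margin: 0 1px; border-radius: 2px;">→</span>')
--             i += 1
--         # Double space
--         elif char == ' ' and i + 1 < len(text) and text[i + 1] == ' ':
--             # Count consecutive spaces
--             space_count = 0
--             j = i
--             while j < len(text) and text[j] == ' ':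
--                 space_count += 1
--                 j += 1
--
--             # Highlight all consecutive spaces
--             for _ in range(space_count):
--                 result.append('<span style="background-color: #ffebee; padding: 2px 4px; margin: 0 1px; border-radius: 2px;">·</span>')
--             i = j
--         else:
--             result.append(char)
--             i += 1
--
--     # Add trailing spaces
--     for i in range(trailing_count):
--         result.append('<span style="background-color: #ffebee; padding: 2px 4px; margin: 0 1px; border-radius: 2px;">·</span>')
--
--     return ''.join(result)
-- ===== SOURCE B (Python) =====
-- DOT = '<span style="background-color: #ffebee; padding: 2px 4px; margin: 0 1px; border-radius: 2px;">\u00b7</span>'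
-- TAB = '<span style="background-color: #ffebee; padding: 2px 6px; margin: 0 1px; border-radius: 2px;">\u2192</span>'
--
--
-- def highlight_whitespace_issues(text):
--     # Run-length decomposition: one pass builds (char, count) runs, then each
--     # run is rendered wholesale instead of scanning character indices.
--     runs = []
--     for ch in text:
--         if runs and runs[-1][0] == ch:
--             runs[-1][1] += 1
--         else:
--             runs.append([ch, 1])
--     out = []
--     if runs and runs[0][0] == ' ':          # leading spaces
--         out.append(DOT * runs[0][1])
--         runs = runs[1:]
--     trail = 0
--     if runs and runs[-1][0] == ' ':         # trailing spaces
--         trail = runs[-1][1]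
--         runs = runs[:-1]
--     for ch, n in runs:                      # middle runs
--         if ch == '\t':
--             out.append(TAB * n)
--         elif ch == ' ' and n >= 2:
--             out.append(DOT * n)
--         else:
--             out.append(ch * n)
--     out.append(DOT * trail)
--     return ''.join(out)
-- ===== Notes on version B (the rewrite author's own statement) =====
-- stated objective: alternative
-- what changed: Replaces A's index-based scanning (lstrip/rstrip arithmetic plus a while-loop with manual consecutive-space counting) by a single run-length decomposition into (char,count) runs that are rendered wholesale per run.
import Mathlib
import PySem

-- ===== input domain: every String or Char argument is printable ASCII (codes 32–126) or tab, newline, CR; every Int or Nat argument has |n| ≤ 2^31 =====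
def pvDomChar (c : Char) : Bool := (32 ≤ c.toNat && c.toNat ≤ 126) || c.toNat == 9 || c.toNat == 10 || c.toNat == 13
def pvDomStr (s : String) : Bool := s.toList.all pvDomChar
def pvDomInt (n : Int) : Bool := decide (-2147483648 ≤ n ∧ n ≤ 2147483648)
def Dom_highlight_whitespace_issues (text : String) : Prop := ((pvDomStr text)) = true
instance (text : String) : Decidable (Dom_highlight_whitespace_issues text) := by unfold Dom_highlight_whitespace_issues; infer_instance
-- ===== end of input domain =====

-- B replaces A's index scanning (lstrip/rstrip arithmetic + a while loop counting
-- consecutive spaces) by a run-length decomposition rendered run by run; alternative, same cost.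


-- shared literal span texts (the two HTML snippets both programs emit)
def pvDot : List Char := "<span style=\"background-color: #ffebee; padding: 2px 4px; margin: 0 1px; border-radius: 2px;\">·</span>".toList
def pvTab : List Char := "<span style=\"background-color: #ffebee; padding: 2px 6px; margin: 0 1px; border-radius: 2px;\">→</span>".toList
def pvDotsRep (n : Nat) : List Char := (List.replicate n pvDot).flatten
def pvTabsRep (n : Nat) : List Char := (List.replicate n pvTab).flatten

-- ===== PORT A =====
-- A's middle while-loop: tab span, double-space run (manual consecutive-space count), else literal
def pvMid : List Char → List Char
  | [] => []
  | c :: rest =>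
    if c = '\t' then pvTab ++ pvMid rest
    else if c = ' ' ∧ rest.head? = some ' ' then
      -- space_count loop: count the consecutive spaces starting here, emit that many dots
      let w := rest.takeWhile (· == ' ')
      pvDotsRep (w.length + 1) ++ pvMid (rest.drop w.length)
    else c :: pvMid rest
  termination_by cs => cs.length
  decreasing_by all_goals simp [List.length_drop]; try omega

def highlight_whitespace_issues (text : String) : String :=
  let cs := text.toList
  -- `if text and text[0] == ' '`: leading_count = len(text) - len(text.lstrip(' '))
  -- (hand port of lstrip(' '), exact: the length of the leading run of spaces)
  let lead := if cs.head? = some ' ' then (cs.takeWhile (· == ' ')).length else 0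
  let cs1 := cs.drop lead
  -- `if text and text[-1] == ' '`: trailing_count = len(text) - len(text.rstrip(' '))
  let trail := if cs1.getLast? = some ' ' then (cs1.reverse.takeWhile (· == ' ')).length else 0
  let cs2 := cs1.take (cs1.length - trail)
  String.ofList (pvDotsRep lead ++ pvMid cs2 ++ pvDotsRep trail)

-- ===== PORT B =====
-- the run-builder loop of Source B: extend the last run or start a new one
def pvRunsStep (gs : List (Char × Nat)) (ch : Char) : List (Char × Nat) :=
  match gs.getLast? with
  | some (c, n) => if c = ch then gs.dropLast ++ [(c, n + 1)] else gs ++ [(ch, 1)]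
  | none => [(ch, 1)]

def pvRuns (cs : List Char) : List (Char × Nat) := cs.foldl pvRunsStep []

-- one middle run of Source B's final for-loop
def pvRender1 (g : Char × Nat) : List Char :=
  if g.1 = '\t' then pvTabsRep g.2
  else if g.1 = ' ' ∧ 2 ≤ g.2 then pvDotsRep g.2
  else List.replicate g.2 g.1

def highlight_whitespace_issues_alt (text : String) : String :=
  let gs0 := pvRuns text.toList
  -- `if runs and runs[0][0] == ' '`
  let (pre, gs1) :=
    match gs0 with
    | (c, n) :: rest => if c = ' ' then (pvDotsRep n, rest) else (([] : List Char), (c, n) :: rest)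
    | [] => (([] : List Char), ([] : List (Char × Nat)))
  -- `if runs and runs[-1][0] == ' '`
  let (trail, gs2) :=
    match gs1.getLast? with
    | some (c, n) => if c = ' ' then (n, gs1.dropLast) else ((0 : Nat), gs1)
    | none => ((0 : Nat), gs1)
  String.ofList (pre ++ gs2.flatMap pvRender1 ++ pvDotsRep trail)

-- ===== PRECONDITION & SPEC =====
def Spec_highlight_whitespace_issues (text : String) (out : String) : Prop := out = highlight_whitespace_issues_alt text
instance (text : String) (out : String) : Decidable (Spec_highlight_whitespace_issues text out) := by unfold Spec_highlight_whitespace_issues; infer_instance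

-- ===== CLAIM (what is proved, stated in full; the proofs are below) =====
def Claim_equal_highlight_whitespace_issues : Prop := ∀ (text : String), Dom_highlight_whitespace_issues text → Spec_highlight_whitespace_issues text (highlight_whitespace_issues text)

-- ===== LEMMAS AND PROOFS =====

-- head-recursive description of Source B's run builder
def pvRunAux (c : Char) (n : Nat) : List Char → List (Char × Nat)
  | [] => [(c, n)]
  | d :: cs => if c = d then pvRunAux c (n + 1) cs else (c, n) :: pvRunAux d 1 cs

theorem pv_foldl_runsStep (cs : List Char) : ∀ (gs : List (Char × Nat)) (c : Char) (n : Nat),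
    cs.foldl pvRunsStep (gs ++ [(c, n)]) = gs ++ pvRunAux c n cs := by
  induction cs with
  | nil => intro gs c n; simp [pvRunAux]
  | cons d cs ih =>
    intro gs c n
    simp only [List.foldl_cons, pvRunsStep, List.getLast?_concat, List.dropLast_concat, pvRunAux]
    by_cases h : c = d
    · simp [h, ih]
    · simp only [if_neg h, List.append_assoc]
      rw [← List.append_assoc, ih]
      simp

theorem pv_runs_cons (c : Char) (cs : List Char) : pvRuns (c :: cs) = pvRunAux c 1 cs := by
  have := pv_foldl_runsStep cs [] c 1
  simpa [pvRuns, pvRunsStep] using this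

theorem pv_runAux_spec (cs : List Char) : ∀ (c : Char) (n : Nat),
    pvRunAux c n cs = (c, n + (cs.takeWhile (· == c)).length) :: pvRuns (cs.dropWhile (· == c)) := by
  induction cs with
  | nil => intro c n; simp [pvRunAux, pvRuns]
  | cons d cs ih =>
    intro c n
    by_cases h : c = d
    · subst h
      simp only [pvRunAux, if_pos rfl, ih c (n + 1), List.takeWhile_cons, List.dropWhile_cons,
        BEq.rfl, if_pos, List.length_cons]
      have : n + 1 + (cs.takeWhile (· == c)).length = n + ((cs.takeWhile (· == c)).length + 1) := by
        omega
      rw [this]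
    · have hbe : (d == c) = false := by simp; exact fun hh => h hh.symm
      simp [pvRunAux, if_neg h, List.takeWhile_cons, List.dropWhile_cons, hbe, pv_runs_cons]

theorem pv_runs_cons_spec (c : Char) (cs : List Char) :
    pvRuns (c :: cs) = (c, 1 + (cs.takeWhile (· == c)).length) :: pvRuns (cs.dropWhile (· == c)) := by
  rw [pv_runs_cons, pv_runAux_spec]

-- takeWhile (== c) is a replicate of c
theorem pv_takeWhile_replicate (cs : List Char) (c : Char) :
    cs.takeWhile (· == c) = List.replicate (cs.takeWhile (· == c)).length c := by
  induction cs with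
  | nil => simp
  | cons d cs ih =>
    by_cases h : d = c
    · subst h; simpa [List.takeWhile_cons, List.replicate_succ] using ih
    · simp [List.takeWhile_cons, h]

theorem pv_head_dropWhile (cs : List Char) (c : Char) :
    (cs.dropWhile (· == c)).head? ≠ some c := by
  induction cs with
  | nil => simp
  | cons d cs ih =>
    by_cases h : d = c
    · simpa [List.dropWhile_cons, h] using ih
    · simp [List.dropWhile_cons, h]

theorem pv_drop_takeWhile (cs : List Char) (p : Char → Bool) :
    cs.drop (cs.takeWhile p).length = cs.dropWhile p := by
  induction cs with
  | nil => simp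
  | cons d cs ih =>
    by_cases h : p d
    · simpa [List.takeWhile_cons, List.dropWhile_cons, h] using ih
    · simp [List.takeWhile_cons, List.dropWhile_cons, h]

theorem pv_cons_split (c : Char) (rest : List Char) :
    c :: rest = List.replicate (1 + (rest.takeWhile (· == c)).length) c ++ rest.dropWhile (· == c) := by
  rw [show 1 + (rest.takeWhile (· == c)).length = (rest.takeWhile (· == c)).length + 1 by omega,
    List.replicate_succ, List.cons_append, ← pv_takeWhile_replicate,
    List.takeWhile_append_dropWhile]

theorem pv_tabsRep_succ (n : Nat) : pvTabsRep (n + 1) = pvTab ++ pvTabsRep n := by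
  simp [pvTabsRep, List.replicate_succ]

-- pvMid over whole runs
theorem pv_mid_tab (k : Nat) (rest : List Char) :
    pvMid (List.replicate k '\t' ++ rest) = pvTabsRep k ++ pvMid rest := by
  induction k with
  | zero => simp [pvTabsRep]
  | succ k ih =>
    rw [List.replicate_succ, List.cons_append, pvMid, pv_tabsRep_succ]
    simp [ih]

theorem pv_mid_other (c : Char) (h1 : c ≠ '\t') (h2 : c ≠ ' ') (k : Nat) (rest : List Char) :
    pvMid (List.replicate k c ++ rest) = List.replicate k c ++ pvMid rest := by
  induction k with
  | zero => simp
  | succ k ih =>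
    rw [List.replicate_succ, List.cons_append, pvMid]
    simp [h1, h2, ih, List.replicate_succ]

theorem pv_tw_replicate_space_append (j : Nat) (r : List Char) (hr : r.head? ≠ some ' ') :
    (List.replicate j ' ' ++ r).takeWhile (· == ' ') = List.replicate j ' ' ∧
    (List.replicate j ' ' ++ r).dropWhile (· == ' ') = r := by
  induction j with
  | zero =>
    cases r with
    | nil => simp
    | cons a t =>
      have ha : (a == ' ') = false := by
        simp only [List.head?] at hr; simp; intro hh; exact hr (by simp [hh])
      simp [List.takeWhile_cons, List.dropWhile_cons, ha]
  | succ j ih =>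
    rw [List.replicate_succ, List.cons_append]
    simp [List.takeWhile_cons, List.dropWhile_cons, List.replicate_succ, ih]

theorem pv_mid_space (k : Nat) (rest : List Char) (h : rest.head? ≠ some ' ') (hk : 1 ≤ k) :
    pvMid (List.replicate k ' ' ++ rest) =
      (if 2 ≤ k then pvDotsRep k else [' ']) ++ pvMid rest := by
  rcases Nat.lt_or_ge k 2 with hk2 | hk2
  · -- k = 1
    have hk1 : k = 1 := by omega
    subst hk1
    rw [List.replicate_one, List.cons_append, pvMid]
    have hne : ¬ (' ' = '\t') := by decide
    cases hr : rest.head? with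
    | none => simp [hne, hr]
    | some a =>
      have ha : a ≠ ' ' := fun hh => h (by rw [hr, hh])
      simp [hne, hr, ha]
  · -- k ≥ 2 : the double-space branch fires
    obtain ⟨j, rfl⟩ : ∃ j, k = j + 2 := ⟨k - 2, by omega⟩
    rw [List.replicate_succ, List.cons_append, pvMid]
    have hhead : (List.replicate (j + 1) ' ' ++ rest).head? = some ' ' := by
      simp [List.replicate_succ]
    rw [if_neg (by decide), if_pos ⟨rfl, hhead⟩]
    have h1 := pv_tw_replicate_space_append (j + 1) rest h
    simp only [h1.1, List.length_replicate]
    have hdrop : (List.replicate (j + 1) ' ' ++ rest).drop (j + 1) = rest := by simp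
    rw [hdrop, if_pos (by omega)]

-- dropWhile only shortens
theorem pv_len_dropWhile_lt (c : Char) (cs : List Char) :
    (cs.dropWhile (· == c)).length < (c :: cs).length := by
  have := List.length_dropWhile_le (· == c) cs
  simp; omega

-- the middle renderer over runs IS A's middle loop, for every list
theorem pv_mid_runs (cs : List Char) : (pvRuns cs).flatMap pvRender1 = pvMid cs := by
  induction hn : cs.length using Nat.strong_induction_on generalizing cs with
  | _ n ih =>
    cases cs with
    | nil => simp [pvRuns, pvMid]
    | cons c rest =>
      rw [pv_runs_cons_spec]
      have hlen : (rest.dropWhile (· == c)).length < n := by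
        rw [← hn]; exact pv_len_dropWhile_lt c rest
      have hih := ih _ hlen (rest.dropWhile (· == c)) rfl
      have hhead : (rest.dropWhile (· == c)).head? ≠ some c := pv_head_dropWhile rest c
      rw [List.flatMap_cons, hih]
      conv_rhs => rw [pv_cons_split c rest]
      by_cases ht : c = '\t'
      · subst ht
        rw [pv_mid_tab]
        simp [pvRender1]
      · by_cases hs : c = ' '
        · subst hs
          rw [pv_mid_space _ _ hhead (by omega)]
          by_cases h2 : 2 ≤ 1 + (rest.takeWhile (· == ' ')).length
          · simp [pvRender1, h2]
          · have h0 : (rest.takeWhile (· == ' ')).length = 0 := by omega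
            simp [pvRender1, h0, List.replicate_one]
        · rw [pv_mid_other c ht hs]
          simp [pvRender1, ht, hs]

-- the char of the last run is the last char
theorem pv_runs_last_char (cs : List Char) :
    ∀ c n, (pvRuns cs).getLast? = some (c, n) → cs.getLast? = some c := by
  induction hn : cs.length using Nat.strong_induction_on generalizing cs with
  | _ m ih =>
    cases cs with
    | nil => intro c n h; simp [pvRuns] at h
    | cons d rest =>
      intro c n h
      rw [pv_runs_cons_spec] at h
      cases hrest : rest.dropWhile (· == d) with
      | nil =>
        rw [hrest] at h
        simp [pvRuns] at h
        rw [pv_cons_split d rest, hrest]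
        simp [List.getLast?_replicate, h.1]
        try omega
      | cons e t =>
        have hlt : (rest.dropWhile (· == d)).length < m := by
          rw [← hn]; exact pv_len_dropWhile_lt d rest
        have hne : pvRuns (rest.dropWhile (· == d)) ≠ [] := by
          rw [hrest, pv_runs_cons_spec]; simp
        rw [show ((d, 1 + (rest.takeWhile (· == d)).length) :: pvRuns (rest.dropWhile (· == d)))
            = [(d, 1 + (rest.takeWhile (· == d)).length)] ++ pvRuns (rest.dropWhile (· == d))
          from rfl, List.getLast?_append_of_ne_nil _ hne] at h
        have := ih _ hlt (rest.dropWhile (· == d)) rfl c n h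
        rw [pv_cons_split d rest,
          List.getLast?_append_of_ne_nil _ (by rw [hrest]; simp)]
        exact this

theorem pv_runs_replicate_space (r : Nat) (hr : 1 ≤ r) :
    pvRuns (List.replicate r ' ') = [(' ', r)] := by
  obtain ⟨j, rfl⟩ : ∃ j, r = j + 1 := ⟨r - 1, by omega⟩
  rw [List.replicate_succ, pv_runs_cons_spec]
  simp [pvRuns]
  omega

-- pvRuns of a list ending in a space run, body not ending in space
theorem pv_runs_append_trail (core : List Char) (r : Nat) (hr : 1 ≤ r)
    (h : core.getLast? ≠ some ' ') :
    pvRuns (core ++ List.replicate r ' ') = pvRuns core ++ [(' ', r)] := by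
  induction hn : core.length using Nat.strong_induction_on generalizing core with
  | _ m ih =>
    cases core with
    | nil => simpa [pvRuns] using pv_runs_replicate_space r hr
    | cons d rest =>
      have hlensum : (rest.takeWhile (· == d)).length + (rest.dropWhile (· == d)).length
          = rest.length := by
        rw [← List.length_append, List.takeWhile_append_dropWhile]
      cases hrest : rest.dropWhile (· == d) with
      | nil =>
        -- the whole core is one run of d, and d ≠ ' '
        have htwself : rest.takeWhile (· == d) = rest := by
          have h2 := List.takeWhile_append_dropWhile (p := (· == d)) (l := rest)
          rw [hrest, List.append_nil] at h2
          exact h2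
        have hdne : d ≠ ' ' := by
          intro hds
          apply h
          rw [pv_cons_split d rest, hrest, List.append_nil]
          simp [List.getLast?_replicate, hds]
          try omega
        have hbe : (' ' == d) = false := by
          simp
          exact fun hh => hdne hh.symm
        have htwr : (List.replicate r ' ').takeWhile (· == d) = [] := by
          obtain ⟨j, rfl⟩ : ∃ j, r = j + 1 := ⟨r - 1, by omega⟩
          simp [List.replicate_succ, List.takeWhile_cons, hbe]
        have hdwr : (List.replicate r ' ').dropWhile (· == d) = List.replicate r ' ' := by
          obtain ⟨j, rfl⟩ : ∃ j, r = j + 1 := ⟨r - 1, by omega⟩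
          simp [List.replicate_succ, List.dropWhile_cons, hbe]
        rw [List.cons_append, pv_runs_cons_spec, pv_runs_cons_spec,
          List.takeWhile_append, if_pos (by rw [htwself]), htwr, List.append_nil, htwself,
          List.dropWhile_append, hrest]
        simp only [List.isEmpty_nil, if_pos, hdwr, hrest]
        rw [pv_runs_replicate_space r hr]
        simp [pvRuns]
      | cons e t =>
        have hdwne : rest.dropWhile (· == d) ≠ [] := by rw [hrest]; simp
        have htwne : ¬ ((rest.takeWhile (· == d)).length = rest.length) := by
          intro heq
          rw [heq] at hlensum
          have hz : (rest.dropWhile (· == d)).length = 0 := by omega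
          exact hdwne (List.eq_nil_of_length_eq_zero hz)
        have hlt : (rest.dropWhile (· == d)).length < m := by
          rw [← hn]; exact pv_len_dropWhile_lt d rest
        have hlast : (rest.dropWhile (· == d)).getLast? ≠ some ' ' := by
          intro hl
          apply h
          rw [pv_cons_split d rest, List.getLast?_append_of_ne_nil _ hdwne]
          exact hl
        have hih := ih _ hlt (rest.dropWhile (· == d)) hlast rfl
        rw [List.cons_append, pv_runs_cons_spec, pv_runs_cons_spec,
          List.takeWhile_append, if_neg htwne, List.dropWhile_append]
        rw [hrest] at hih ⊢
        simp only [List.isEmpty_cons, Bool.false_eq_true, if_false, hih]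
        simp

-- A's trailing-strip + middle equals B's last-run handling, for every list
theorem pv_rest (cs1 : List Char) :
    pvMid (cs1.take (cs1.length -
        (if cs1.getLast? = some ' ' then (cs1.reverse.takeWhile (· == ' ')).length else 0))) ++
      pvDotsRep (if cs1.getLast? = some ' ' then (cs1.reverse.takeWhile (· == ' ')).length else 0) =
    (match (pvRuns cs1).getLast? with
      | some (c, n) => if c = ' ' then (n, (pvRuns cs1).dropLast) else ((0 : Nat), pvRuns cs1)
      | none => ((0 : Nat), pvRuns cs1)).2.flatMap pvRender1 ++
      pvDotsRep (match (pvRuns cs1).getLast? with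
      | some (c, n) => if c = ' ' then (n, (pvRuns cs1).dropLast) else ((0 : Nat), pvRuns cs1)
      | none => ((0 : Nat), pvRuns cs1)).1 := by
  by_cases hL : cs1.getLast? = some ' '
  · -- trailing spaces present
    have hrev : cs1.reverse.head? = some ' ' := by rw [List.head?_reverse]; exact hL
    have hlen1 : 1 ≤ (cs1.reverse.takeWhile (· == ' ')).length := by
      cases hc : cs1.reverse with
      | nil => rw [hc] at hrev; simp at hrev
      | cons a t =>
        rw [hc] at hrev
        simp at hrev
        simp [List.takeWhile_cons, hrev]
    set L := (cs1.reverse.takeWhile (· == ' ')).length with hLdef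
    set core := (cs1.reverse.dropWhile (· == ' ')).reverse with hcoredef
    have hdecomp : cs1 = core ++ List.replicate L ' ' := by
      conv_lhs => rw [← List.reverse_reverse cs1]
      conv_lhs => rw [← List.takeWhile_append_dropWhile (p := (· == ' ')) (l := cs1.reverse)]
      rw [List.reverse_append]
      congr 1
      rw [hLdef]
      conv_lhs => rw [pv_takeWhile_replicate]
      rw [List.reverse_replicate]
    have hcore_last : core.getLast? ≠ some ' ' := by
      rw [hcoredef, List.getLast?_reverse]
      exact pv_head_dropWhile _ ' '
    have hruns : pvRuns cs1 = pvRuns core ++ [(' ', L)] := by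
      rw [hdecomp]
      exact pv_runs_append_trail core L hlen1 hcore_last
    have htake : cs1.take (cs1.length - L) = core := by
      rw [hdecomp, List.length_append, List.length_replicate,
        Nat.add_sub_cancel, List.take_left]
    rw [if_pos hL, htake, hruns, List.getLast?_concat]
    dsimp only
    rw [if_pos (show (' ' : Char) = ' ' from rfl), List.dropLast_concat, pv_mid_runs]
  · -- no trailing spaces: the last run (if any) is not a space run
    rw [if_neg hL, Nat.sub_zero, List.take_length]
    cases hg : (pvRuns cs1).getLast? with
    | none => simp [pv_mid_runs]
    | some g =>
      obtain ⟨c, n⟩ := g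
      have hc : ¬ (c = ' ') := by
        intro hh
        subst hh
        exact hL (pv_runs_last_char cs1 ' ' n hg)
      simp only [if_neg hc]
      rw [pv_mid_runs]

-- the full pipelines agree, list level (bodies of the two ports)
theorem pv_top (cs : List Char) :
    (let lead := if cs.head? = some ' ' then (cs.takeWhile (· == ' ')).length else 0
     let cs1 := cs.drop lead
     let trail := if cs1.getLast? = some ' ' then (cs1.reverse.takeWhile (· == ' ')).length else 0
     let cs2 := cs1.take (cs1.length - trail)
     pvDotsRep lead ++ pvMid cs2 ++ pvDotsRep trail) =
    (let gs0 := pvRuns cs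
     let (pre, gs1) :=
       match gs0 with
       | (c, n) :: rest => if c = ' ' then (pvDotsRep n, rest) else (([] : List Char), (c, n) :: rest)
       | [] => (([] : List Char), ([] : List (Char × Nat)))
     let (trail, gs2) :=
       match gs1.getLast? with
       | some (c, n) => if c = ' ' then (n, gs1.dropLast) else ((0 : Nat), gs1)
       | none => ((0 : Nat), gs1)
     pre ++ gs2.flatMap pvRender1 ++ pvDotsRep trail) := by
  by_cases h0 : cs.head? = some ' '
  · -- leading spaces
    obtain ⟨rest, rfl⟩ : ∃ rest, cs = ' ' :: rest := by
      cases cs with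
      | nil => simp at h0
      | cons a t =>
        simp at h0
        exact ⟨t, by rw [h0]⟩
    have hdrop : (' ' :: rest).drop ((' ' :: rest).takeWhile (· == ' ')).length
        = rest.dropWhile (· == ' ') := by
      rw [pv_drop_takeWhile, List.dropWhile_cons]
      simp
    have htw : ((' ' :: rest).takeWhile (· == ' ')).length
        = 1 + (rest.takeWhile (· == ' ')).length := by
      simp [List.takeWhile_cons]
      omega
    simp only [h0, if_pos, pv_runs_cons_spec, hdrop]
    rw [htw]
    rw [List.append_assoc, List.append_assoc]
    exact congrArg _ (pv_rest (rest.dropWhile (· == ' ')))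
  · -- no leading spaces
    simp only [if_neg h0]
    have hz : pvDotsRep 0 = [] := by simp [pvDotsRep]
    cases cs with
    | nil =>
      simp [hz, pvRuns, pvMid, pvDotsRep]
    | cons c rest =>
      have hc : ¬ (c = ' ') := by
        intro hh
        exact h0 (by rw [hh]; rfl)
      rw [List.drop_zero, hz, List.nil_append]
      conv_rhs => rw [pv_runs_cons_spec]
      simp only [if_neg hc]
      rw [← pv_runs_cons_spec]
      exact pv_rest (c :: rest)

-- ===== VERDICT (by name: the statement is the Claim_ definition above) =====
theorem highlight_whitespace_issues_spec : Claim_equal_highlight_whitespace_issues := by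
  intro text _
  unfold Spec_highlight_whitespace_issues highlight_whitespace_issues highlight_whitespace_issues_alt
  exact congrArg String.ofList (pv_top text.toList)
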